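-- pv_equiv track=rewrite | github.com/waynegault/ancestry | relationship_utils.py | _has_direct_relationship
-- ===== SOURCE A (Python) =====
-- from typing import (
--     Optional,
--     Dict,
--     Any,
--     Union,
--     List,
--     Tuple,
--     Set,
--     Callable,
-- )  # Added Callable for test suite
--
-- def _has_direct_relationship(
--     id1: str,
--     id2: str,
--     id_to_parents: Dict[str, Set[str]],
--     id_to_children: Dict[str, Set[str]],
-- ) -> bool:
--     """
--     Check if two individuals have a direct relationship (parent-child, siblings, or spouses).
--
--     Args:
--         id1: ID of the first individual
--         id2: ID of the second individual
--         id_to_parents: Dictionary mapping individual IDs to their parent IDs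
--         id_to_children: Dictionary mapping individual IDs to their child IDs
--
--     Returns:
--         True if directly related, False otherwise
--     """
--     # Parent-child relationship
--     if id2 in id_to_parents.get(id1, set()) or id1 in id_to_parents.get(id2, set()):
--         return True
--
--     # Sibling relationship (share at least one parent)
--     parents_1 = id_to_parents.get(id1, set())
--     parents_2 = id_to_parents.get(id2, set())
--     if parents_1 and parents_2 and not parents_1.isdisjoint(parents_2):
--         return True
--
--     # Check for grandparent relationship
--     for parent_id in id_to_parents.get(id1, set()):
--         if id2 in id_to_parents.get(parent_id, set()):
--             return True
--
--     # Check for grandchild relationship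
--     for child_id in id_to_children.get(id1, set()):
--         if id2 in id_to_children.get(child_id, set()):
--             return True
--
--     return False
-- ===== SOURCE B (Python) =====
-- def _has_direct_relationship(id1, id2, id_to_parents, id_to_children):
--     parents_1 = id_to_parents.get(id1, set())
--     parents_2 = id_to_parents.get(id2, set())
--     # direct parent/child or shared parent (intersection truthiness covers both guards)
--     if id2 in parents_1 or id1 in parents_2 or parents_1 & parents_2:
--         return True
--     # grandparent: instead of looking up each of id1's parents, scan the parent table once
--     if any(k in parents_1 and id2 in ps for k, ps in id_to_parents.items()):
--         return True
--     # grandchild: same table-scan over the children table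
--     children_1 = id_to_children.get(id1, set())
--     return any(k in children_1 and id2 in cs for k, cs in id_to_children.items())
-- ===== Notes on version B (the rewrite author's own statement) =====
-- stated objective: alternative
-- what changed: B inverts the two-hop joins: instead of A's inner dictionary lookups per parent/child (for p in parents(id1): id2 in parents(p)), B scans each whole table once with items() and tests the key for membership in id1's parent/child set, and it folds A's parent-child and guarded-sibling branches into one test using intersection truthiness.
import Mathlib
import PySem

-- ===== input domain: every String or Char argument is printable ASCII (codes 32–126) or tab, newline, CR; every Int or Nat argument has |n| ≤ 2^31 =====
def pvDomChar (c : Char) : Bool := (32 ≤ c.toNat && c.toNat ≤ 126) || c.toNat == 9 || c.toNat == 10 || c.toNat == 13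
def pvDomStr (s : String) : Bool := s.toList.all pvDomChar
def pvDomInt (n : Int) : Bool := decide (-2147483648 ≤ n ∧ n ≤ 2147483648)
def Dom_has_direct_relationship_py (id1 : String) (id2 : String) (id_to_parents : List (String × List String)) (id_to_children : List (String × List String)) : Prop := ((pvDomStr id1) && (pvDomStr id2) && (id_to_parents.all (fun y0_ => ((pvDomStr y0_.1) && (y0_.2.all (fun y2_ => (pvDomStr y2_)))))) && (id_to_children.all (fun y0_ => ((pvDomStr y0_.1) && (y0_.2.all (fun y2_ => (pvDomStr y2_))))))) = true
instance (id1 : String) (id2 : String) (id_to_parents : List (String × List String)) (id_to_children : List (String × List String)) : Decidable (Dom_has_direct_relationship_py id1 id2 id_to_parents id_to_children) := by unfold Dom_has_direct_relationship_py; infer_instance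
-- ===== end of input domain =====

-- B inverts the two-hop joins: instead of A's inner dictionary lookup per parent/child, B scans each
-- whole table once with items() and tests the key against id1's parent/child set; the parent-child
-- and guarded-sibling branches fold into one intersection-truthiness test (objective: alternative).
-- ===== PORT A =====
-- d.get(k, set()) on the first-match association-list model of the Python dict
def pvGet (d : List (String × List String)) (k : String) : List String :=
  PySem.Dict.getD (PySem.Dict.mk d) k []

def has_direct_relationship_py (id1 : String) (id2 : String) (id_to_parents : List (String × List String)) (id_to_children : List (String × List String)) : Bool :=
  -- if id2 in id_to_parents.get(id1, set()) or id1 in id_to_parents.get(id2, set()): return True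
  if (pvGet id_to_parents id1).contains id2 || (pvGet id_to_parents id2).contains id1 then true
  else
    -- sibling check, guarded by truthiness of both parent sets as in A
    let parents_1 := pvGet id_to_parents id1
    let parents_2 := pvGet id_to_parents id2
    if (!parents_1.isEmpty) && (!parents_2.isEmpty) && !(PySem.Set.isdisjoint parents_1 parents_2) then true
    else
      -- grandparent loop
      if (pvGet id_to_parents id1).any (fun parent_id => (pvGet id_to_parents parent_id).contains id2) then true
      else
        -- grandchild loop
        if (pvGet id_to_children id1).any (fun child_id => (pvGet id_to_children child_id).contains id2) then true
        else false

-- ===== PORT B =====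
-- dct.items() under the first-match association-list convention: one pair per key, first
-- occurrence wins (exact for a Python dict, whose keys are unique; order as in the list)
def pvItems : List (String × List String) → List (String × List String)
  | [] => []
  | p :: rest => p :: (pvItems rest).filter (fun q => q.1 != p.1)

def has_direct_relationship_py_alt (id1 : String) (id2 : String) (id_to_parents : List (String × List String)) (id_to_children : List (String × List String)) : Bool :=
  let parents_1 := pvGet id_to_parents id1
  let parents_2 := pvGet id_to_parents id2
  -- if id2 in parents_1 or id1 in parents_2 or parents_1 & parents_2: return True
  if parents_1.contains id2 || parents_2.contains id1 || !(PySem.Set.inter parents_1 parents_2).isEmpty then true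
  -- if any(k in parents_1 and id2 in ps for k, ps in id_to_parents.items()): return True
  else if (pvItems id_to_parents).any (fun kv => parents_1.contains kv.1 && kv.2.contains id2) then true
  else
    -- return any(k in children_1 and id2 in cs for k, cs in id_to_children.items())
    let children_1 := pvGet id_to_children id1
    (pvItems id_to_children).any (fun kv => children_1.contains kv.1 && kv.2.contains id2)

-- ===== PRECONDITION & SPEC =====
def Spec_has_direct_relationship_py (id1 : String) (id2 : String) (id_to_parents : List (String × List String)) (id_to_children : List (String × List String)) (out : Bool) : Prop := out = has_direct_relationship_py_alt id1 id2 id_to_parents id_to_children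
instance (id1 : String) (id2 : String) (id_to_parents : List (String × List String)) (id_to_children : List (String × List String)) (out : Bool) : Decidable (Spec_has_direct_relationship_py id1 id2 id_to_parents id_to_children out) := by unfold Spec_has_direct_relationship_py; infer_instance

-- ===== CLAIM (what is proved, stated in full; the proofs are below) =====
def Claim_equal_has_direct_relationship_py : Prop := ∀ (id1 : String) (id2 : String) (id_to_parents : List (String × List String)) (id_to_children : List (String × List String)), Dom_has_direct_relationship_py id1 id2 id_to_parents id_to_children → Spec_has_direct_relationship_py id1 id2 id_to_parents id_to_children (has_direct_relationship_py id1 id2 id_to_parents id_to_children)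

-- ===== LEMMAS AND PROOFS =====
theorem pvGet_cons (a : String) (b : List String) (d : List (String × List String)) (k : String) :
    pvGet ((a, b) :: d) k = if a = k then b else pvGet d k := by
  simp [pvGet, PySem.Dict.getD_eq_get?_getD, PySem.Dict.get?_mk_cons]
  split_ifs <;> rfl

-- a pair listed by items() carries the dict's value for its key
theorem pvItems_get (d : List (String × List String)) :
    ∀ {k vs}, (k, vs) ∈ pvItems d → pvGet d k = vs := by
  induction d with
  | nil => intro k vs h; simp [pvItems] at h
  | cons p rest ih =>
    intro k vs h
    obtain ⟨a, b⟩ := p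
    rw [pvItems] at h
    rcases List.mem_cons.mp h with h | h
    · obtain ⟨rfl, rfl⟩ := Prod.mk.inj h
      rw [pvGet_cons]; simp
    · have hm := List.mem_filter.mp h
      have hne : k ≠ a := by
        intro rfl; simp at hm
      rw [pvGet_cons, if_neg (fun h' => hne h'.symm)]
      exact ih hm.1

-- a key whose dict value is nonempty appears in items() with that value
theorem pvItems_mem (d : List (String × List String)) :
    ∀ {k}, pvGet d k ≠ [] → (k, pvGet d k) ∈ pvItems d := by
  induction d with
  | nil =>
    intro k h
    exact absurd rfl h
  | cons p rest ih =>
    intro k h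
    obtain ⟨a, b⟩ := p
    rw [pvGet_cons] at h ⊢
    by_cases hak : a = k
    · subst hak; simp [pvItems]
    · rw [if_neg hak] at h ⊢
      refine List.mem_cons.mpr (Or.inr (List.mem_filter.mpr ⟨ih h, ?_⟩))
      simpa using fun h' => hak h'.symm

-- the table scan of B computes exactly A's per-element lookup loop
theorem scan_eq_lookup (d : List (String × List String)) (s : List String) (y : String) :
    (pvItems d).any (fun kv => s.contains kv.1 && kv.2.contains y)
      = s.any (fun p => (pvGet d p).contains y) := by
  rw [Bool.eq_iff_iff]
  simp only [List.any_eq_true, Bool.and_eq_true, List.contains_eq_mem, decide_eq_true_eq]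
  constructor
  · rintro ⟨⟨k, vs⟩, hmem, hk, hy⟩
    exact ⟨k, hk, (pvItems_get d hmem) ▸ hy⟩
  · rintro ⟨p, hp, hy⟩
    exact ⟨(p, pvGet d p), pvItems_mem d (List.ne_nil_of_mem hy), hp, hy⟩

-- ===== VERDICT (by name: the statement is the Claim_ definition above) =====
theorem has_direct_relationship_py_spec : Claim_equal_has_direct_relationship_py := by
  intro id1 id2 idp idc _
  unfold Spec_has_direct_relationship_py
  unfold has_direct_relationship_py has_direct_relationship_py_alt
  simp only [Bool.if_true_left, scan_eq_lookup]
  rw [Bool.eq_iff_iff]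
  simp only [Bool.or_eq_true, Bool.and_eq_true, Bool.not_eq_true',
    List.any_eq_true, List.contains_eq_mem, decide_eq_true_eq,
    List.isEmpty_eq_false_iff]
  have hd : (PySem.Set.isdisjoint (pvGet idp id1) (pvGet idp id2) = false) ↔
      ∃ x ∈ pvGet idp id1, x ∈ pvGet idp id2 := by
    rw [← Bool.not_eq_true, PySem.Set.isdisjoint_iff]
    push Not; simp
  have hi : (PySem.Set.inter (pvGet idp id1) (pvGet idp id2) ≠ []) ↔
      ∃ x ∈ pvGet idp id1, x ∈ pvGet idp id2 := by
    constructor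
    · intro h
      obtain ⟨x, hx⟩ := List.exists_mem_of_ne_nil _ h
      have := (PySem.Set.mem_inter _ _ _).mp hx
      exact ⟨x, this.1, this.2⟩
    · rintro ⟨x, h1, h2⟩
      exact List.ne_nil_of_mem ((PySem.Set.mem_inter _ _ _).mpr ⟨h1, h2⟩)
  rw [hd, hi]
  constructor
  · rintro (⟨h | h⟩ | ⟨⟨_, _⟩, h⟩ | h | h | h)
    · exact Or.inl (Or.inl (Or.inl h))
    · exact Or.inl (Or.inl (Or.inr h))
    · exact Or.inl (Or.inr h)
    · exact Or.inr (Or.inl h)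
    · exact Or.inr (Or.inr h)
    · exact absurd h (by simp)
  · rintro (((h | h) | h) | h | h)
    · exact Or.inl (Or.inl h)
    · exact Or.inl (Or.inr h)
    · obtain ⟨x, h1, h2⟩ := h
      exact Or.inr (Or.inl ⟨⟨List.ne_nil_of_mem h1, List.ne_nil_of_mem h2⟩, x, h1, h2⟩)
    · exact Or.inr (Or.inr (Or.inl h))
    · exact Or.inr (Or.inr (Or.inr (Or.inl h)))
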